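-- pv_equiv track=rewrite | github.com/neelima-bhaktha/mangolang | src/main.py | translate_code
-- ===== SOURCE A (Python) =====
-- SLANG_MAP = {
--     "andhaa": "if",
--     "bete": "else",
--     "onji-onji": "for",
--     "adaga": "while",
--     "yavuyaa": "break",
--     "panyaa": "print",
--     "put_yaa": "input",
--     "that_means": "def",
--     "tikkuga": "return",
--     "bka" : "and",
--     "ath_anda" :"or",
--     "ijji" : "not"
-- }
--
-- def translate_code(code):
--     result = []
--     i = 0
--     length = len(code)
--
--     while i < length:
--         char = code[i]
--
--         # Handle string literals
--         if char in ('"', "'"):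
--             quote_type = char
--             string_token = char
--             i += 1
--
--             while i < length and code[i] != quote_type:
--                 string_token += code[i]
--                 i += 1
--
--             if i < length:
--                 string_token += code[i]  # closing quote
--                 i += 1
--
--             result.append(string_token)
--
--         # Handle identifiers
--         elif char.isalpha() or char == "_":
--             identifier = char
--             i += 1
--
--             while i < length and (code[i].isalnum() or code[i] == "_"):
--                 identifier += code[i]
--                 i += 1
--
--             # Replace only if exact match
--             result.append(SLANG_MAP.get(identifier, identifier))
--
--         else:
--             result.append(char)
--             i += 1
--
--     return "".join(result)
-- ===== SOURCE B (Python) =====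
-- SLANG_MAP = {
--     "andhaa": "if",
--     "bete": "else",
--     "onji-onji": "for",
--     "adaga": "while",
--     "yavuyaa": "break",
--     "panyaa": "print",
--     "put_yaa": "input",
--     "that_means": "def",
--     "tikkuga": "return",
--     "bka" : "and",
--     "ath_anda" :"or",
--     "ijji" : "not"
-- }
--
-- # Single-pass state machine over the characters (no index arithmetic, no inner scans):
-- # modes NORMAL / IN_STRING / IN_IDENT, buffering the current token and flushing at boundaries.
-- NORMAL, IN_STRING, IN_IDENT = 0, 1, 2
--
-- def _start(ch, out):
--     """Handle ch from the NORMAL state; return (mode, quote, buf)."""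
--     if ch == '"' or ch == "'":
--         return IN_STRING, ch, [ch]
--     if ch.isalpha() or ch == '_':
--         return IN_IDENT, '', [ch]
--     out.append(ch)
--     return NORMAL, '', []
--
-- def translate_code(code):
--     out = []
--     mode, quote, buf = NORMAL, '', []
--     for ch in code:
--         if mode == IN_STRING:
--             buf.append(ch)
--             if ch == quote:
--                 out.append(''.join(buf))
--                 mode, quote, buf = NORMAL, '', []
--         elif mode == IN_IDENT:
--             if ch.isalnum() or ch == '_':
--                 buf.append(ch)
--             else:
--                 word = ''.join(buf)
--                 out.append(SLANG_MAP.get(word, word))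
--                 mode, quote, buf = _start(ch, out)
--         else:
--             mode, quote, buf = _start(ch, out)
--     if mode == IN_STRING:
--         out.append(''.join(buf))
--     elif mode == IN_IDENT:
--         word = ''.join(buf)
--         out.append(SLANG_MAP.get(word, word))
--     return ''.join(out)
-- ===== Notes on version B (the rewrite author's own statement) =====
-- stated objective: alternative
-- what changed: Replaced A's index-based outer while loop with nested inner scanning loops by a single fold over the characters driving a three-state machine (normal / in-string / in-identifier) that buffers the current token and flushes it at boundaries.
import Mathlib
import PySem

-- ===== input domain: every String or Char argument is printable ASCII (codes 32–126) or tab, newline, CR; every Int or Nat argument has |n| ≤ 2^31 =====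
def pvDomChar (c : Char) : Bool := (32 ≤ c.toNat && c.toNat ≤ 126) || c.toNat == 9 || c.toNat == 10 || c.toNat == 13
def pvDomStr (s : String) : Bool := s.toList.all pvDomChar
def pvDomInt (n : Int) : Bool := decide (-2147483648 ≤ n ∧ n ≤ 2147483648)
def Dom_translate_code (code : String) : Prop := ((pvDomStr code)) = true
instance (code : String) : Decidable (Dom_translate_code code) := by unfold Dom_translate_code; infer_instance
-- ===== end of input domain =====

-- B replaces A's index/while scanning with a one-pass three-state machine (fold over the
-- characters, buffering the current token and flushing at boundaries); same output, same cost.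

-- shared module constant (the Python dict SLANG_MAP, used identically by both programs)
def slangMap : List (String × String) :=
  [("andhaa", "if"), ("bete", "else"), ("onji-onji", "for"), ("adaga", "while"),
   ("yavuyaa", "break"), ("panyaa", "print"), ("put_yaa", "input"), ("that_means", "def"),
   ("tikkuga", "return"), ("bka", "and"), ("ath_anda", "or"), ("ijji", "not")]

-- SLANG_MAP.get(identifier, identifier)
def slangGet (s : String) : String := ((slangMap.lookup s).getD s)

def isQuote (c : Char) : Bool := c = '"' || c = '\''
-- char.isalpha() or char == "_"  (PySem.Chars.isalpha is Python's str.isalpha on one char)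
def isIdentStart (c : Char) : Bool := PySem.Chars.isalpha c || c = '_'
-- code[i].isalnum() or code[i] == "_"
def isIdentCont (c : Char) : Bool := PySem.Chars.isalnum c || c = '_'

-- ===== PORT A =====
-- inner while loop of the string-literal case: scan up to (and including) the closing quote
def aStr (q : Char) : List Char → List Char × List Char
  | [] => ([], [])
  | c :: rest =>
    if c = q then ([c], rest)
    else
      let p := aStr q rest
      (c :: p.1, p.2)

-- inner while loop of the identifier case
def aIdent : List Char → List Char × List Char
  | [] => ([], [])
  | c :: rest =>
    if isIdentCont c then
      let p := aIdent rest
      (c :: p.1, p.2)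
    else ([], c :: rest)

theorem aStr_len (q : Char) : ∀ l : List Char, (aStr q l).2.length ≤ l.length := by
  intro l; induction l with
  | nil => simp [aStr]
  | cons c rest ih => simp only [aStr]; split <;> simp <;> omega

theorem aIdent_len : ∀ l : List Char, (aIdent l).2.length ≤ l.length := by
  intro l; induction l with
  | nil => simp [aIdent]
  | cons c rest ih => simp only [aIdent]; split <;> simp <;> omega

-- outer while loop of A, appending tokens to `result`
def aGo : List Char → List String
  | [] => []
  | c :: rest =>
    if isQuote c then
      let p := aStr c rest
      String.mk (c :: p.1) :: aGo p.2
    else if isIdentStart c then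
      let p := aIdent rest
      slangGet (String.mk (c :: p.1)) :: aGo p.2
    else
      String.mk [c] :: aGo rest
termination_by l => l.length
decreasing_by
  · exact Nat.lt_succ_of_le (aStr_len _ _)
  · exact Nat.lt_succ_of_le (aIdent_len _)
  · exact Nat.lt_succ_self _

def translate_code (code : String) : String := PySem.Str.join "" (aGo code.toList)

-- ===== PORT B =====
inductive BMode where
  | norm : BMode
  | instr : Char → BMode   -- inside a string literal, carrying the quote char
  | inid : BMode           -- inside an identifier
deriving DecidableEq

-- state: (mode, buffered token chars in reverse, emitted pieces in reverse)
-- _start: handle a char from the NORMAL state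
def bStart (c : Char) (out : List String) : BMode × List Char × List String :=
  if isQuote c then (.instr c, [c], out)
  else if isIdentStart c then (.inid, [c], out)
  else (.norm, [], String.mk [c] :: out)

def bStep : BMode × List Char × List String → Char → BMode × List Char × List String
  | (.instr q, buf, out), c =>
    if c = q then (.norm, [], String.mk (c :: buf).reverse :: out)
    else (.instr q, c :: buf, out)
  | (.inid, buf, out), c =>
    if isIdentCont c then (.inid, c :: buf, out)
    else bStart c (slangGet (String.mk buf.reverse) :: out)
  | (.norm, _, out), c => bStart c out

def bFinish : BMode × List Char × List String → List String
  | (.norm, _, out) => out.reverse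
  | (.instr _, buf, out) => (String.mk buf.reverse :: out).reverse
  | (.inid, buf, out) => (slangGet (String.mk buf.reverse) :: out).reverse

def translate_code_alt (code : String) : String :=
  PySem.Str.join "" (bFinish (code.toList.foldl bStep (.norm, [], [])))

-- ===== PRECONDITION & SPEC =====
def Spec_translate_code (code : String) (out : String) : Prop := out = translate_code_alt code
instance (code : String) (out : String) : Decidable (Spec_translate_code code out) := by unfold Spec_translate_code; infer_instance

-- ===== CLAIM (what is proved, stated in full; the proofs are below) =====
def Claim_equal_translate_code : Prop := ∀ (code : String), Dom_translate_code code → Spec_translate_code code (translate_code code)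

-- ===== LEMMAS AND PROOFS =====

-- the three invariants of B's state machine, phrased against A's token scanners
theorem key (l : List Char) :
    (∀ out, bFinish (l.foldl bStep (.norm, [], out)) = out.reverse ++ aGo l)
    ∧ (∀ q buf out, bFinish (l.foldl bStep (.instr q, buf, out)) =
        out.reverse ++ (String.mk (buf.reverse ++ (aStr q l).1) :: aGo (aStr q l).2))
    ∧ (∀ buf out, bFinish (l.foldl bStep (.inid, buf, out)) =
        out.reverse ++ (slangGet (String.mk (buf.reverse ++ (aIdent l).1)) :: aGo (aIdent l).2)) := by
  induction l with
  | nil => simp [bFinish, aGo, aStr, aIdent]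
  | cons c rest ih =>
    obtain ⟨ihN, ihS, ihI⟩ := ih
    refine ⟨?_, ?_, ?_⟩
    · intro out
      simp only [List.foldl_cons, bStep, bStart]
      by_cases hq : isQuote c
      · simp [hq, ihS, aGo]
      · by_cases hi : isIdentStart c
        · simp [hq, hi, ihI, aGo]
        · simp [hq, hi, ihN, aGo]
    · intro q buf out
      simp only [List.foldl_cons, bStep]
      by_cases hc : c = q
      · simp [hc, ihN, aStr]
      · simp [hc, ihS, aStr]
    · intro buf out
      simp only [List.foldl_cons, bStep, bStart]
      by_cases hk : isIdentCont c
      · simp [hk, ihI, aIdent]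
      · by_cases hq : isQuote c
        · simp [hk, hq, ihS, aIdent, aGo]
        · by_cases hi : isIdentStart c
          · simp [hk, hq, hi, ihI, aIdent, aGo]
          · simp [hk, hq, hi, ihN, aIdent, aGo]

-- ===== VERDICT (by name: the statement is the Claim_ definition above) =====
theorem translate_code_spec : Claim_equal_translate_code := by
  intro code _
  unfold Spec_translate_code translate_code translate_code_alt
  rw [(key code.toList).1 []]
  simp
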